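-- pv_equiv track=rewrite | github.com/varshini200504/rnsit_sam_py | day4/sum_of_digits.py | sum_of_odd_placed_even_digits
-- ===== SOURCE A (Python) =====
-- def sum_of_odd_placed_even_digits(number):
--     sum1 = 0
--     sum2 = 0
--     flip = True
--     while number > 0:
--         digit = number % 10
--         number = number // 10
--         if digit % 2 == 0:
--             if flip:
--                 sum1 += digit
--             else:
--                 sum2 += digit
--         flip = not flip
--     if flip:
--         return sum2
--     return sum1
-- ===== SOURCE B (Python) =====
-- def sum_of_odd_placed_even_digits(number):
--     digits = []
--     while number > 0:
--         digits.append(number % 10)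
--         number = number // 10
--     return sum(d for pos, d in enumerate(digits)
--                if d % 2 == 0 and (len(digits) - pos) % 2 == 1)
-- ===== Notes on version B (the rewrite author's own statement) =====
-- stated objective: simpler
-- what changed: B drops A's flip flag and the two alternating accumulators: it collects the digit list once and then sums, in a single comprehension, the even digits at the first, third, fifth, … positions from the left.
import Mathlib
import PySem

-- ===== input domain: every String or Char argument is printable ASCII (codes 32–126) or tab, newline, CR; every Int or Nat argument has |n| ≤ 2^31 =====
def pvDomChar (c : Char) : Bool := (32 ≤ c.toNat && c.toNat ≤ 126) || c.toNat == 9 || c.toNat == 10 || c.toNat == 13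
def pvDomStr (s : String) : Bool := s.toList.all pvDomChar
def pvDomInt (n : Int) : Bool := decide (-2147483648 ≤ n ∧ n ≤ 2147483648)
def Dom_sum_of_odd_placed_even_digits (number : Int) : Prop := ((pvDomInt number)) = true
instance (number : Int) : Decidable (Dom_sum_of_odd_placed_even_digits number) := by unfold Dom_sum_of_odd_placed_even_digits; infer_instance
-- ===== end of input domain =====

-- B replaces A's flip flag and two accumulators by building the digit list once and summing,
-- in one pass, the even digits at the first, third, fifth, … positions from the left (objective: simpler).

lemma pv_fdiv10_lt (n : Int) (h : n > 0) : (PySem.Int.floordiv n 10).toNat < n.toNat := by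
  have : n.fdiv 10 < n := by
    rw [Int.fdiv_eq_ediv_of_nonneg _ (by norm_num)]
    omega
  simp only [PySem.Int.floordiv]
  omega

-- ===== PORT A =====
-- literal port of A's while loop: two accumulators and a flip flag, least-significant digit first
def pvLoopA (number sum1 sum2 : Int) (flip : Bool) : Int :=
  if h : number > 0 then
    let digit := PySem.Int.mod number 10
    let number' := PySem.Int.floordiv number 10
    if PySem.Int.mod digit 2 = 0 then
      if flip then pvLoopA number' (sum1 + digit) sum2 (!flip)
      else pvLoopA number' sum1 (sum2 + digit) (!flip)
    else pvLoopA number' sum1 sum2 (!flip)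
  else if flip then sum2 else sum1
termination_by number.toNat
decreasing_by all_goals exact pv_fdiv10_lt number h

def sum_of_odd_placed_even_digits (number : Int) : Int :=
  pvLoopA number 0 0 true

-- ===== PORT B =====
-- literal port of Source B: collect the digits (least significant first), then one summing pass
def pvDigitsB (number : Int) (acc : List Int) : List Int :=
  if h : number > 0 then
    pvDigitsB (PySem.Int.floordiv number 10) (acc ++ [PySem.Int.mod number 10])
  else acc
termination_by number.toNat
decreasing_by exact pv_fdiv10_lt number h

def sum_of_odd_placed_even_digits_alt (number : Int) : Int :=
  let digits := pvDigitsB number []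
  (PySem.List.enumerate digits).foldl
    (fun t p =>
      if PySem.Int.mod p.2 2 = 0 ∧ PySem.Int.mod ((digits.length : Int) - p.1) 2 = 1
      then t + p.2 else t) 0

-- ===== PRECONDITION & SPEC =====
def Spec_sum_of_odd_placed_even_digits (number : Int) (out : Int) : Prop := out = sum_of_odd_placed_even_digits_alt number
instance (number : Int) (out : Int) : Decidable (Spec_sum_of_odd_placed_even_digits number out) := by unfold Spec_sum_of_odd_placed_even_digits; infer_instance

-- ===== CLAIM (what is proved, stated in full; the proofs are below) =====
def Claim_equal_sum_of_odd_placed_even_digits : Prop := ∀ (number : Int), Dom_sum_of_odd_placed_even_digits number → Spec_sum_of_odd_placed_even_digits number (sum_of_odd_placed_even_digits number)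

-- ===== LEMMAS AND PROOFS =====

-- little-endian digit list of n, accumulator-free
def pvL (number : Int) : List Int :=
  if h : number > 0 then
    PySem.Int.mod number 10 :: pvL (PySem.Int.floordiv number 10)
  else []
termination_by number.toNat
decreasing_by exact pv_fdiv10_lt number h

lemma pvDigitsB_eq (number : Int) : ∀ (acc : List Int),
    pvDigitsB number acc = acc ++ pvL number := by
  fun_induction pvL number with
  | case1 n h ih =>
    intro acc
    rw [pvDigitsB, dif_pos h, ih]
    simp
  | case2 n h =>
    intro acc
    rw [pvDigitsB, dif_neg h]
    simp

-- the selected sum: even digits d at little-endian index i with (len - i) odd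
def pvS : List Int → Int
  | [] => 0
  | d :: tl =>
      (if PySem.Int.mod d 2 = 0 ∧ (d :: tl).length % 2 = 1 then d else 0) + pvS tl

lemma pvLoopA_eq (number : Int) : ∀ (s1 s2 : Int) (flip : Bool),
    pvLoopA number s1 s2 flip =
      (if (pvL number).length % 2 = (if flip then 0 else 1) then s2 else s1) + pvS (pvL number) := by
  fun_induction pvL number with
  | case1 n h ih =>
    intro s1 s2 flip
    rw [pvLoopA, dif_pos h]
    cases flip <;>
      by_cases he : PySem.Int.mod (PySem.Int.mod n 10) 2 = 0 <;>
      simp only [he, ite_true, ite_false, Bool.not_true, Bool.not_false, Bool.false_eq_true,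
        eq_self_iff_true, if_true, if_false, ih, pvS, List.length_cons, true_and, false_and] <;>
      split_ifs <;> omega
  | case2 n h =>
    intro s1 s2 flip
    rw [pvLoopA, dif_neg h]
    cases flip <;> simp [pvS]

lemma pvFoldl_eq (L : Int) (f : Int → Int × Int → Int)
    (hf : f = fun t p =>
      if PySem.Int.mod p.2 2 = 0 ∧ PySem.Int.mod (L - p.1) 2 = 1 then t + p.2 else t) :
    ∀ (ds : List Int) (k t : Int), L = k + ds.length →
      (PySem.List.enumerate ds k).foldl f t = t + pvS ds := by
  intro ds
  induction ds with
  | nil => intro k t _; simp [PySem.List.enumerate, pvS]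
  | cons d tl ih =>
    intro k t hL
    have hcons : PySem.List.enumerate (d :: tl) k = (k, d) :: PySem.List.enumerate tl (k + 1) := by
      simp [PySem.List.enumerate]
    rw [hcons, List.foldl_cons, ih (k + 1) _ (by push_cast [List.length_cons] at hL ⊢; omega)]
    have hmod : (PySem.Int.mod (L - k) 2 = 1) = ((d :: tl).length % 2 = 1) := by
      have hLk : L - k = ((d :: tl).length : Int) := by
        omega
      have h2 : PySem.Int.mod (L - k) 2 = (L - k) % 2 := by
        simp [PySem.Int.mod, Int.fmod_eq_emod]
      rw [h2, hLk]
      apply propext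
      constructor <;> intro <;> omega
    simp only [hf, pvS, hmod]
    split_ifs <;> omega

-- ===== VERDICT (by name: the statement is the Claim_ definition above) =====
theorem sum_of_odd_placed_even_digits_spec : Claim_equal_sum_of_odd_placed_even_digits := by
  unfold Claim_equal_sum_of_odd_placed_even_digits
  intro number _
  unfold Spec_sum_of_odd_placed_even_digits
  unfold sum_of_odd_placed_even_digits sum_of_odd_placed_even_digits_alt
  simp only [pvDigitsB_eq, List.nil_append]
  have hb := pvFoldl_eq ((pvL number).length : Int) _ rfl (pvL number) 0 0 (by simp)
  rw [pvLoopA_eq, hb]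
  split_ifs <;> omega
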